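-- pv_equiv track=rewrite | github.com/santule/indelmip | scripts/site_3_mut_away.py | count_mutations
-- ===== SOURCE A (Python) =====
-- def count_mutations(p,n,c1,c2):
--     tn,i1a,i1b,i2a,i2b,i3 = 0,0,0,0,0,0
--
--     for i in range(0,len(n)):
--         if n[i] == p[i] == c1[i] == c2[i]:
--             continue
--         elif n[i] == p[i]: #(node and parent position are equal)
--             if c1[i] == c2[i] and c1[i] != n[i]:
--                 i2b += 1
--             if c1[i] != c2[i]: # kids are not equal
--                 i1b += 1
--         elif n[i] != p[i]: #(node not equal to parent)
--             if c1[i] != c2[i]: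
--                 i2a += 1
--             if c1[i] == c2[i] and c1[i] == n[i]:
--                 i1a += 1
--             if c1[i] == c2[i] and c1[i] != n[i]:
--                 i3 += 1
--     if i1a + i1b + i2a + i2b + i3 == 0: # no mutations
--         tn = 0
--     else:
--         tn = 1
--     return [tn,i1a,i1b,i2a,i2b,i3]
-- ===== SOURCE B (Python) =====
-- def count_mutations(p, n, c1, c2):
--     idx = range(len(n))
--     i1a = sum(1 for i in idx if n[i] != p[i] and c1[i] == c2[i] and c1[i] == n[i])
--     i1b = sum(1 for i in idx if n[i] == p[i] and c1[i] != c2[i])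
--     i2a = sum(1 for i in idx if n[i] != p[i] and c1[i] != c2[i])
--     i2b = sum(1 for i in idx if n[i] == p[i] and c1[i] == c2[i] and c1[i] != n[i])
--     i3  = sum(1 for i in idx if n[i] != p[i] and c1[i] == c2[i] and c1[i] != n[i])
--     tn = 1 if (i1a or i1b or i2a or i2b or i3) else 0
--     return [tn, i1a, i1b, i2a, i2b, i3]
-- ===== Notes on version B (the rewrite author's own statement) =====
-- stated objective: simpler
-- what changed: Replaces the single fused loop with mutable counters and nested branches by five independent counting passes, one per category, each driven by a predicate that fully encodes its branch condition; tn is derived from the counters.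
import Mathlib
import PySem

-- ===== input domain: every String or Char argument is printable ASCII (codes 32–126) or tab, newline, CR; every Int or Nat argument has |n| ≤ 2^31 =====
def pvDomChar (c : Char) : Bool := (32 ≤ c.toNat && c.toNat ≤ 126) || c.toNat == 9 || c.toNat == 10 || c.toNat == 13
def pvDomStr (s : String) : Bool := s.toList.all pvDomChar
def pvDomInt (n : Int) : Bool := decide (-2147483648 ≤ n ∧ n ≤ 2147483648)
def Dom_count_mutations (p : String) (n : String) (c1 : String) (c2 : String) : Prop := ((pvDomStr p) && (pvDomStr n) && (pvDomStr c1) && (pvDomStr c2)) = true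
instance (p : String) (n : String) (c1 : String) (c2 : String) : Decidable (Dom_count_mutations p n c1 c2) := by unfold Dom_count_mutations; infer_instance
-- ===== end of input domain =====

-- B replaces A's fused accumulator loop by five independent per-category counting passes (objective: simpler).


-- ===== PORT A =====
-- one step of A's loop body, updating (i1a, i1b, i2a, i2b, i3); indices taken
-- with getD (exact inside Pre_, where every index is in range)
def cmStepA (pl nl al bl : List Char) (s : Int × Int × Int × Int × Int) (i : Nat) :
    Int × Int × Int × Int × Int :=
  let ni := nl.getD i ' '
  let pi := pl.getD i ' '
  let a := al.getD i ' '
  let b := bl.getD i ' '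
  let (i1a, i1b, i2a, i2b, i3) := s
  if ni = pi ∧ pi = a ∧ a = b then s
  else if ni = pi then
    let i2b := if a = b ∧ a ≠ ni then i2b + 1 else i2b
    let i1b := if a ≠ b then i1b + 1 else i1b
    (i1a, i1b, i2a, i2b, i3)
  else
    let i2a := if a ≠ b then i2a + 1 else i2a
    let i1a := if a = b ∧ a = ni then i1a + 1 else i1a
    let i3 := if a = b ∧ a ≠ ni then i3 + 1 else i3
    (i1a, i1b, i2a, i2b, i3)

def count_mutations (p : String) (n : String) (c1 : String) (c2 : String) : List Int :=
  let pl := p.toList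
  let nl := n.toList
  let al := c1.toList
  let bl := c2.toList
  let (i1a, i1b, i2a, i2b, i3) :=
    (List.range nl.length).foldl (cmStepA pl nl al bl) (0, 0, 0, 0, 0)
  let tn : Int := if i1a + i1b + i2a + i2b + i3 = 0 then 0 else 1
  [tn, i1a, i1b, i2a, i2b, i3]

-- ===== PORT B =====
-- the five branch predicates of Source B, one per category
def cmP1a (pl nl al bl : List Char) (i : Nat) : Bool :=
  nl.getD i ' ' != pl.getD i ' ' && al.getD i ' ' == bl.getD i ' ' && al.getD i ' ' == nl.getD i ' '
def cmP1b (pl nl al bl : List Char) (i : Nat) : Bool :=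
  nl.getD i ' ' == pl.getD i ' ' && al.getD i ' ' != bl.getD i ' '
def cmP2a (pl nl al bl : List Char) (i : Nat) : Bool :=
  nl.getD i ' ' != pl.getD i ' ' && al.getD i ' ' != bl.getD i ' '
def cmP2b (pl nl al bl : List Char) (i : Nat) : Bool :=
  nl.getD i ' ' == pl.getD i ' ' && al.getD i ' ' == bl.getD i ' ' && al.getD i ' ' != nl.getD i ' '
def cmP3 (pl nl al bl : List Char) (i : Nat) : Bool :=
  nl.getD i ' ' != pl.getD i ' ' && al.getD i ' ' == bl.getD i ' ' && al.getD i ' ' != nl.getD i ' '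

def count_mutations_alt (p : String) (n : String) (c1 : String) (c2 : String) : List Int :=
  let pl := p.toList
  let nl := n.toList
  let al := c1.toList
  let bl := c2.toList
  let idx := List.range nl.length
  let i1a : Int := (idx.countP (cmP1a pl nl al bl) : Nat)
  let i1b : Int := (idx.countP (cmP1b pl nl al bl) : Nat)
  let i2a : Int := (idx.countP (cmP2a pl nl al bl) : Nat)
  let i2b : Int := (idx.countP (cmP2b pl nl al bl) : Nat)
  let i3 : Int := (idx.countP (cmP3 pl nl al bl) : Nat)
  let tn : Int := if i1a ≠ 0 ∨ i1b ≠ 0 ∨ i2a ≠ 0 ∨ i2b ≠ 0 ∨ i3 ≠ 0 then 1 else 0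
  [tn, i1a, i1b, i2a, i2b, i3]

-- ===== PRECONDITION & SPEC =====
-- Pre_ excludes exactly the inputs where A raises IndexError: some position of n
-- indexes past the end of p, c1 or c2 (B raises there too).
def Pre_count_mutations (p : String) (n : String) (c1 : String) (c2 : String) : Prop :=
  n.toList.length ≤ p.toList.length ∧ n.toList.length ≤ c1.toList.length ∧
    n.toList.length ≤ c2.toList.length
instance (p : String) (n : String) (c1 : String) (c2 : String) :
    Decidable (Pre_count_mutations p n c1 c2) := by unfold Pre_count_mutations; infer_instance

def pvWitness_count_mutations : String × String × String × String := ("AB", "AC", "AC", "BC")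

def Spec_count_mutations (p : String) (n : String) (c1 : String) (c2 : String) (out : List Int) : Prop := out = count_mutations_alt p n c1 c2
instance (p : String) (n : String) (c1 : String) (c2 : String) (out : List Int) : Decidable (Spec_count_mutations p n c1 c2 out) := by unfold Spec_count_mutations; infer_instance

-- ===== CLAIM (what is proved, stated in full; the proofs are below) =====
def Claim_equal_count_mutations : Prop := ∀ (p : String) (n : String) (c1 : String) (c2 : String), Dom_count_mutations p n c1 c2 → Pre_count_mutations p n c1 c2 → Spec_count_mutations p n c1 c2 (count_mutations p n c1 c2)

-- ===== LEMMAS AND PROOFS =====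

-- step lemma on plain characters: A's branch structure adds the five indicators
theorem cmStep_core (ni pi a b : Char) (i1a i1b i2a i2b i3 : Int) :
    (if ni = pi ∧ pi = a ∧ a = b then (i1a, i1b, i2a, i2b, i3)
     else if ni = pi then
       (i1a, (if a ≠ b then i1b + 1 else i1b), i2a,
        (if a = b ∧ a ≠ ni then i2b + 1 else i2b), i3)
     else
       ((if a = b ∧ a = ni then i1a + 1 else i1a), i1b,
        (if a ≠ b then i2a + 1 else i2a), i2b,
        (if a = b ∧ a ≠ ni then i3 + 1 else i3))) =
      (i1a + (if ni ≠ pi ∧ a = b ∧ a = ni then 1 else 0),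
       i1b + (if ni = pi ∧ a ≠ b then 1 else 0),
       i2a + (if ni ≠ pi ∧ a ≠ b then 1 else 0),
       i2b + (if ni = pi ∧ a = b ∧ a ≠ ni then 1 else 0),
       i3 + (if ni ≠ pi ∧ a = b ∧ a ≠ ni then 1 else 0)) := by
  by_cases hnp : ni = pi <;> by_cases hpa : pi = a <;> by_cases hab : a = b <;>
    by_cases han : a = ni <;> simp_all

-- one step of A's loop adds exactly the indicator of each category's predicate
theorem cmStepA_eq (pl nl al bl : List Char) (s : Int × Int × Int × Int × Int) (i : Nat) :
    cmStepA pl nl al bl s i =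
      (s.1 + (if cmP1a pl nl al bl i then 1 else 0),
       s.2.1 + (if cmP1b pl nl al bl i then 1 else 0),
       s.2.2.1 + (if cmP2a pl nl al bl i then 1 else 0),
       s.2.2.2.1 + (if cmP2b pl nl al bl i then 1 else 0),
       s.2.2.2.2 + (if cmP3 pl nl al bl i then 1 else 0)) := by
  obtain ⟨i1a, i1b, i2a, i2b, i3⟩ := s
  simp only [cmStepA, cmP1a, cmP1b, cmP2a, cmP2b, cmP3, Bool.and_eq_true, bne_iff_ne,
    beq_iff_eq, and_assoc]
  exact cmStep_core _ _ _ _ _ _ _ _ _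

-- A's fold over any index list equals the accumulator plus the five counts
theorem cmFold_eq (pl nl al bl : List Char) (L : List Nat) (s : Int × Int × Int × Int × Int) :
    L.foldl (cmStepA pl nl al bl) s =
      (s.1 + (L.countP (cmP1a pl nl al bl) : Nat),
       s.2.1 + (L.countP (cmP1b pl nl al bl) : Nat),
       s.2.2.1 + (L.countP (cmP2a pl nl al bl) : Nat),
       s.2.2.2.1 + (L.countP (cmP2b pl nl al bl) : Nat),
       s.2.2.2.2 + (L.countP (cmP3 pl nl al bl) : Nat)) := by
  induction L generalizing s with
  | nil => simp
  | cons i L ih =>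
    simp only [List.foldl_cons, ih, cmStepA_eq, List.countP_cons]
    refine congrArg₂ Prod.mk ?_ (congrArg₂ Prod.mk ?_ (congrArg₂ Prod.mk ?_
      (congrArg₂ Prod.mk ?_ ?_))) <;>
      (simp only [Nat.cast_add, apply_ite (Nat.cast : Nat → Int), Nat.cast_one, Nat.cast_zero,
        ]
       split_ifs <;> ring)

-- ===== VERDICT (by name: the statement is the Claim_ definition above) =====
theorem count_mutations_spec : Claim_equal_count_mutations := by
  intro p n c1 c2 _ _
  unfold Spec_count_mutations count_mutations count_mutations_alt
  simp only [cmFold_eq, zero_add]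
  congr 1
  split_ifs with h1 h2 <;> omega
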